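-- pv_equiv track=rewrite | github.com/Cho-SangHyun/Algorithm-Study | 백준/18310-안테나.py | solution
-- ===== SOURCE A (Python) =====
-- def solution(n, locations):
--     locations.sort()
--     if n % 2 == 1:
--         return locations[n // 2]
--
--     n1, n2 = n // 2, n // 2 - 1
--     a1, a2 = 0, 0
--     for i in range(n):
--         if i != n1:
--             a1 += abs(locations[i] - locations[n1])
--         if i != n2:
--             a2 += abs(locations[i] - locations[n2])
--
--     if a1 >= a2:
--         return locations[n2]
--     return locations[n1]
-- ===== SOURCE B (Python) =====
-- def solution(n, locations):
--     # For even n the sum of distances to the lower and to the upper median is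
--     # identical, so A's comparison loop always picks the lower median; both
--     # parities collapse to the single index (n - 1) // 2 of the sorted list.
--     locations.sort()
--     return locations[(n - 1) // 2]
-- ===== Notes on version B (the rewrite author's own statement) =====
-- stated objective: simpler
-- what changed: A sorts and then, for even n, runs an O(n) loop comparing the distance sums of the two middle candidates; B proves that for even n both sums are equal (so A always picks the lower median) and returns sorted(locations)[(n-1)//2] directly, with no loop and no parity branch.
import Mathlib
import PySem

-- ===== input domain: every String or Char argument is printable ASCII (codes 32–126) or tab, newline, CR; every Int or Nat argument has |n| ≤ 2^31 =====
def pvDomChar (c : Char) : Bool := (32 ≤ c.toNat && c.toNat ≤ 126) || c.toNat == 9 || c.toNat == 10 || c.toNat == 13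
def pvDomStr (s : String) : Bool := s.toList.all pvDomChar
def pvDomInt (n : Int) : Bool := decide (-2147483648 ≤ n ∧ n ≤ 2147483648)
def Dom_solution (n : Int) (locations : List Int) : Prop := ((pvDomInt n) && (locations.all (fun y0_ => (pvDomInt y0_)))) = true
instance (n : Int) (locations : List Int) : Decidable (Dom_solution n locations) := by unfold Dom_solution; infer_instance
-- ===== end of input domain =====

-- B replaces A's O(n) distance-comparison loop by the single index (n-1)//2 of the sorted
-- list (for even n both medians give equal distance sums, so A always picks the lower one);
-- equivalence is about the RETURN value (both A and B sort `locations` in place).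

-- ===== PORT A =====
def solution (n : Int) (locations : List Int) : Int :=
  let s := PySem.List.sorted locations (fun x => x) false
  if PySem.Int.mod n 2 = 1 then
    PySem.List.pyGetD s (PySem.Int.floordiv n 2) 0
  else
    let n1 := PySem.Int.floordiv n 2
    let n2 := PySem.Int.floordiv n 2 - 1
    let p := (PySem.List.pyRange 0 n 1).foldl
      (fun (ab : Int × Int) i =>
        (if i ≠ n1 then ab.1 + |PySem.List.pyGetD s i 0 - PySem.List.pyGetD s n1 0| else ab.1,
         if i ≠ n2 then ab.2 + |PySem.List.pyGetD s i 0 - PySem.List.pyGetD s n2 0| else ab.2))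
      (0, 0)
    if p.1 ≥ p.2 then PySem.List.pyGetD s n2 0 else PySem.List.pyGetD s n1 0

-- ===== PORT B =====
def solution_alt (n : Int) (locations : List Int) : Int :=
  PySem.List.pyGetD (PySem.List.sorted locations (fun x => x) false)
    (PySem.Int.floordiv (n - 1) 2) 0

-- ===== PRECONDITION & SPEC =====
-- Pre_ excludes exactly the inputs where A raises IndexError (a median/loop index out of range).
def Pre_solution (n : Int) (locations : List Int) : Prop :=
  if PySem.Int.mod n 2 = 1 then
    PySem.Raise.InRange locations.length (PySem.Int.floordiv n 2)
  else
    (0 < n ∧ n ≤ (locations.length : Int)) ∨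
    (n ≤ 0 ∧ PySem.Raise.InRange locations.length (PySem.Int.floordiv n 2 - 1))
instance (n : Int) (locations : List Int) : Decidable (Pre_solution n locations) := by
  unfold Pre_solution; infer_instance

def pvWitness_solution : Int × List Int := (4, [7, 1, 5, 3])

def Spec_solution (n : Int) (locations : List Int) (out : Int) : Prop := out = solution_alt n locations
instance (n : Int) (locations : List Int) (out : Int) : Decidable (Spec_solution n locations out) := by unfold Spec_solution; infer_instance

-- ===== CLAIM (what is proved, stated in full; the proofs are below) =====
def Claim_equal_solution : Prop := ∀ (n : Int) (locations : List Int), Dom_solution n locations → Pre_solution n locations → Spec_solution n locations (solution n locations)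

-- ===== LEMMAS AND PROOFS =====

theorem pv_foldl_pair (l : List Int) (n1 n2 : Int) (F G : Int → Int) (a b : Int) :
    l.foldl (fun (ab : Int × Int) i =>
        (if i ≠ n1 then ab.1 + F i else ab.1,
         if i ≠ n2 then ab.2 + G i else ab.2)) (a, b)
      = (a + (l.map (fun i => if i = n1 then 0 else F i)).sum,
         b + (l.map (fun i => if i = n2 then 0 else G i)).sum) := by
  induction l generalizing a b with
  | nil => simp
  | cons x xs ih =>
    simp only [List.foldl_cons, List.map_cons, List.sum_cons, ih]
    refine Prod.ext ?_ ?_ <;> dsimp only <;> split_ifs with h <;> simp_all <;> ring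

theorem pv_abs_le {x m : Int} (h : x ≤ m) : |x - m| = m - x := by
  rw [abs_sub_comm, abs_of_nonneg (by omega)]

theorem pv_abs_ge {x m : Int} (h : m ≤ x) : |x - m| = x - m := abs_of_nonneg (by omega)

-- ===== VERDICT =====
theorem solution_spec : Claim_equal_solution := by
  intro n locations _ hpre
  unfold Spec_solution solution solution_alt
  unfold Pre_solution at hpre
  set s := PySem.List.sorted locations (fun x => x) false with hs
  have hlen : s.length = locations.length := PySem.List.length_sorted _ _ _
  rcases PySem.Int.mod_two_eq n with he | ho
  · -- even case
    have hfd := PySem.Int.floordiv_mul_add_mod n 2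
    rw [he] at hfd
    set fd := PySem.Int.floordiv n 2 with hfddef
    have hn : n = 2 * fd := by omega
    have hB : PySem.Int.floordiv (n - 1) 2 = fd - 1 := by
      rw [PySem.Int.floordiv_eq_iff_of_pos (by omega)]; omega
    simp only [he, if_neg (by omega : ¬ (0:Int) = 1)] at hpre ⊢
    rw [hB]
    by_cases hpos : 0 < n
    · -- 0 < n, n ≤ len
      have hnL : n ≤ (locations.length : Int) := by
        rcases hpre with ⟨_, h⟩ | ⟨h, _⟩ <;> omega
      have hfd1 : 1 ≤ fd := by omega
      have hfdL : fd < (s.length : Int) := by omega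
      have hm21 : PySem.List.pyGetD s (fd - 1) 0 ≤ PySem.List.pyGetD s fd 0 := by
        rw [PySem.List.pyGetD_eq_getElem s 0 (by omega) (by omega),
            PySem.List.pyGetD_eq_getElem s 0 (by omega) (by omega)]
        exact PySem.List.sorted_id_getElem_mono locations (by omega)
          (by rw [hlen]; omega)
      set m1 := PySem.List.pyGetD s fd 0 with hm1
      set m2 := PySem.List.pyGetD s (fd - 1) 0 with hm2
      rw [pv_foldl_pair]
      -- drop the excluded (zero) terms
      have hmap1 : (PySem.List.pyRange 0 n).map (fun i => if i = fd then 0 else |PySem.List.pyGetD s i 0 - m1|)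
          = (PySem.List.pyRange 0 n).map (fun i => |PySem.List.pyGetD s i 0 - m1|) := by
        apply List.map_congr_left; intro i _
        split_ifs with h
        · rw [h, hm1]; simp
        · rfl
      have hmap2 : (PySem.List.pyRange 0 n).map (fun i => if i = fd - 1 then 0 else |PySem.List.pyGetD s i 0 - m2|)
          = (PySem.List.pyRange 0 n).map (fun i => |PySem.List.pyGetD s i 0 - m2|) := by
        apply List.map_congr_left; intro i _
        split_ifs with h
        · rw [h, hm2]; simp
        · rfl
      rw [hmap1, hmap2]
      -- split the range at fd
      have hsplit : PySem.List.pyRange 0 n = PySem.List.pyRange 0 fd ++ PySem.List.pyRange fd n :=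
        PySem.List.pyRange_one_append 0 fd n (by omega) (by omega)
      have key : ((PySem.List.pyRange 0 n).map (fun i => |PySem.List.pyGetD s i 0 - m1|)).sum
          = ((PySem.List.pyRange 0 n).map (fun i => |PySem.List.pyGetD s i 0 - m2|)).sum := by
        rw [hsplit]
        simp only [List.map_append, List.sum_append]
        have lo1 : (PySem.List.pyRange 0 fd).map (fun i => |PySem.List.pyGetD s i 0 - m1|)
            = (PySem.List.pyRange 0 fd).map (fun i => (m1 - m2) + |PySem.List.pyGetD s i 0 - m2|) := by
          apply List.map_congr_left; intro i hi
          rw [PySem.List.mem_pyRange_one] at hi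
          have hle : PySem.List.pyGetD s i 0 ≤ m2 := by
            rw [PySem.List.pyGetD_eq_getElem s 0 (by omega) (by omega),
                hm2, PySem.List.pyGetD_eq_getElem s 0 (by omega) (by omega)]
            exact PySem.List.sorted_id_getElem_mono locations (by omega) (by rw [hlen]; omega)
          rw [pv_abs_le (by omega), pv_abs_le hle]; ring
        have hi2 : (PySem.List.pyRange fd n).map (fun i => |PySem.List.pyGetD s i 0 - m2|)
            = (PySem.List.pyRange fd n).map (fun i => (m1 - m2) + |PySem.List.pyGetD s i 0 - m1|) := by
          apply List.map_congr_left; intro i hi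
          rw [PySem.List.mem_pyRange_one] at hi
          have hge : m1 ≤ PySem.List.pyGetD s i 0 := by
            rw [PySem.List.pyGetD_eq_getElem s 0 (by omega) (by omega),
                hm1, PySem.List.pyGetD_eq_getElem s 0 (by omega) (by omega)]
            exact PySem.List.sorted_id_getElem_mono locations (by omega) (by rw [hlen]; omega)
          rw [pv_abs_ge (by omega), pv_abs_ge hge]; ring
        rw [lo1, hi2, PySem.List.sum_map_add_int, PySem.List.sum_map_add_int,
            PySem.List.sum_map_const_int, PySem.List.sum_map_const_int,
            PySem.List.length_pyRange_one, PySem.List.length_pyRange_one]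
        have : ((n - fd).toNat : Int) = ((fd - 0).toNat : Int) := by omega
        rw [this]; ring
      simp only [key, ge_iff_le, le_refl, if_pos]
    · -- n ≤ 0: empty loop, a1 = a2 = 0
      have : PySem.List.pyRange 0 n = [] := PySem.List.pyRange_one_eq_nil (by omega)
      rw [this]
      simp
  · -- odd case: n // 2 = (n - 1) // 2
    have hfd := PySem.Int.floordiv_mul_add_mod n 2
    rw [ho] at hfd
    have : PySem.Int.floordiv (n - 1) 2 = PySem.Int.floordiv n 2 := by
      rw [PySem.Int.floordiv_eq_iff_of_pos (by omega)]; omega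
    rw [if_pos ho, this]
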